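-- pv_equiv track=rewrite | github.com/the-y9/py-docs | hennge_backend.py | power_yn
-- ===== SOURCE A (Python) =====
-- from typing import List
--
-- def power_yn(X: int, Yn: List[str], current_index: int, case_sum: int) -> int:
--     if current_index >=X:
--         return case_sum
--     try:
--         y = int(Yn[current_index])
--     except (ValueError, IndexError) as e:
--         return -1
--     if y<=0:
--         new_sum = case_sum + (y**4)
--     else:
--         new_sum = case_sum
--     return power_yn(X, Yn, current_index + 1, new_sum)
-- ===== SOURCE B (Python) =====
-- from typing import List
--
-- def power_yn(X: int, Yn: List[str], current_index: int, case_sum: int) -> int: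
--     total = case_sum
--     for i in range(current_index, X):
--         try:
--             y = int(Yn[i])
--         except (ValueError, IndexError):
--             return -1
--         if y <= 0:
--             total += y ** 4
--     return total
-- ===== Notes on version B (the rewrite author's own statement) =====
-- stated objective: simpler
-- what changed: Replaces the tail recursion over (current_index, case_sum) with a plain iterative for-loop over range(current_index, X) with an accumulator, returning -1 on the first parse/index error.
import Mathlib
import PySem

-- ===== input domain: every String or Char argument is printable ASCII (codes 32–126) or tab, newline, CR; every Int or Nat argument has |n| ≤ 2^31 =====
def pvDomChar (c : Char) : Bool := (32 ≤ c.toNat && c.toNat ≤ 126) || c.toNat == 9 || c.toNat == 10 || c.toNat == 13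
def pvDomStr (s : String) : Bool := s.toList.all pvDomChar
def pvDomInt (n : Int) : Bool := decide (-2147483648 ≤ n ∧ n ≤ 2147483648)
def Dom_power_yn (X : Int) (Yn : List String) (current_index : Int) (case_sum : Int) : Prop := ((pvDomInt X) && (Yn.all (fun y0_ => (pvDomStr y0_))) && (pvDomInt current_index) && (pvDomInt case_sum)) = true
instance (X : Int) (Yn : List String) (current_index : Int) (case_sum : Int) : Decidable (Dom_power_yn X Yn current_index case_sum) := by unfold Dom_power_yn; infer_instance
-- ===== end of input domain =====

-- B replaces A's tail recursion with an iterative for-loop over range(current_index, X) and an accumulator (objective: simpler).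

-- ===== PORT A =====
-- literal port of the recursive Python A; negative indexing and int() failures return -1 via pyGet?/ofStr?
def power_yn (X : Int) (Yn : List String) (current_index : Int) (case_sum : Int) : Int :=
  if current_index ≥ X then case_sum
  else
    match PySem.List.pyGet? Yn current_index with
    | none => -1
    | some s =>
      match PySem.Int.ofStr? s with
      | none => -1
      | some y =>
        power_yn X Yn (current_index + 1) (if y ≤ 0 then case_sum + y ^ 4 else case_sum)
termination_by (X - current_index).toNat
decreasing_by omega

-- ===== PORT B =====
-- the for-loop body of Source B: walk the index list, accumulate, -1 on first failure
def powerLoop (Yn : List String) : List Int → Int → Int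
  | [], total => total
  | i :: rest, total =>
    match PySem.List.pyGet? Yn i with
    | none => -1
    | some s =>
      match PySem.Int.ofStr? s with
      | none => -1
      | some y => powerLoop Yn rest (if y ≤ 0 then total + y ^ 4 else total)

def power_yn_alt (X : Int) (Yn : List String) (current_index : Int) (case_sum : Int) : Int :=
  powerLoop Yn (PySem.List.pyRange current_index X 1) case_sum

-- ===== PRECONDITION & SPEC =====
def Spec_power_yn (X : Int) (Yn : List String) (current_index : Int) (case_sum : Int) (out : Int) : Prop := out = power_yn_alt X Yn current_index case_sum
instance (X : Int) (Yn : List String) (current_index : Int) (case_sum : Int) (out : Int) : Decidable (Spec_power_yn X Yn current_index case_sum out) := by unfold Spec_power_yn; infer_instance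

-- ===== CLAIM (what is proved, stated in full; the proofs are below) =====
def Claim_equal_power_yn : Prop := ∀ (X : Int) (Yn : List String) (current_index : Int) (case_sum : Int), Dom_power_yn X Yn current_index case_sum → Spec_power_yn X Yn current_index case_sum (power_yn X Yn current_index case_sum)

-- ===== LEMMAS AND PROOFS =====
theorem power_yn_eq_loop (X : Int) (Yn : List String) :
    ∀ (n : Nat) (ci cs : Int), (X - ci).toNat ≤ n →
      power_yn X Yn ci cs = powerLoop Yn (PySem.List.pyRange ci X 1) cs := by
  intro n
  induction n with
  | zero =>
    intro ci cs h
    have hge : ci ≥ X := by omega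
    rw [power_yn, if_pos hge, PySem.List.pyRange_one_eq_nil (by omega), powerLoop]
  | succ n ih =>
    intro ci cs h
    by_cases hge : ci ≥ X
    · rw [power_yn, if_pos hge, PySem.List.pyRange_one_eq_nil (by omega), powerLoop]
    · rw [power_yn, if_neg hge, PySem.List.pyRange_one_cons (by omega), powerLoop]
      cases PySem.List.pyGet? Yn ci with
      | none => rfl
      | some s =>
        dsimp only
        cases PySem.Int.ofStr? s with
        | none => rfl
        | some y => exact ih (ci + 1) _ (by omega)

-- ===== VERDICT (by name: the statement is the Claim_ definition above) =====
theorem power_yn_spec : Claim_equal_power_yn := by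
  intro X Yn ci cs _
  exact power_yn_eq_loop X Yn (X - ci).toNat ci cs le_rfl
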